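-- pv_equiv track=rewrite | github.com/KrzysztoPy/Calculator | PerformationTheOperation/ExecutionTheOperation.py | operations_on_action
-- ===== SOURCE A (Python) =====
-- def operations_on_action(operation):
--     copy_operation = operation
--     memory_if_log = ''
--     temp_log_position = None
--
--     number = []
--     number_position = []
--     is_number_flag = False
--
--     add_sub_position = []
--     mul_div_exp_position = []
--     per_fac_position = []
--     log_position = []
--     square_position = []
--
--     log_nat_position = []
--     round_brackets_position_open = []
--     round_brackets_position_close = []
--     abs_brackets_position = []
--
--     for position_in_operation in range(0, copy_operation.__len__()):
--         try:
--             int(copy_operation[position_in_operation])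
--             number.append(int(copy_operation[position_in_operation]))
--             number_position.append(position_in_operation)
--             is_number_flag = True
--         except ValueError as e:
--             pass
--
--         finally:
--             if is_number_flag:
--                 is_number_flag = False
--
--             elif not is_number_flag:
--                 if copy_operation[position_in_operation] == '+' or copy_operation[position_in_operation] == '-':
--                     add_sub_position.append(position_in_operation)
--                     if memory_if_log and temp_log_position:
--                         log_position.append(temp_log_position)
--                     continue
--
--                 elif copy_operation[position_in_operation] == '*' or copy_operation[position_in_operation] == '/' or \
--                         copy_operation[position_in_operation] == '^':
--                     mul_div_exp_position.append(position_in_operation)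
--                     if memory_if_log and temp_log_position:
--                         log_position.append(temp_log_position)
--                     continue
--
--                 elif copy_operation[position_in_operation] == '%' or copy_operation[position_in_operation] == '!':
--                     per_fac_position.append(position_in_operation)
--                     if memory_if_log and temp_log_position:
--                         log_position.append(temp_log_position)
--                         memory_if_log = ''
--                         temp_log_position = None
--                     continue
--
--                 elif copy_operation[position_in_operation] == 'l':
--                     memory_if_log == copy_operation[position_in_operation]
--                     temp_log_position = position_in_operation
--                     continue
--
--                 elif memory_if_log and copy_operation[position_in_operation] == 'n':
--                     if memory_if_log:
--                         position = str(temp_log_position) + str(position_in_operation)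
--                         log_nat_position.append(position)
--                         memory_if_log = ''
--                         temp_log_position = None
--                         continue
--
--                 elif copy_operation[position_in_operation] == 's':
--                     square_position.append(copy_operation[position_in_operation])
--                     continue
--
--                 elif copy_operation[position_in_operation] == '(':
--                     round_brackets_position_open.append(position_in_operation)
--                     continue
--
--                 elif copy_operation[position_in_operation] == ')':
--                     round_brackets_position_close.append(position_in_operation)
--                     continue
--
--                 elif copy_operation[position_in_operation] == '|':
--                     abs_brackets_position.append(position_in_operation)
--                     continue
--
--     return number, number_position
-- ===== SOURCE B (Python) =====
-- import re
--
--
-- def operations_on_action(operation):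
--     matches = list(re.finditer(r'\d', operation))
--     return [int(m.group()) for m in matches], [m.start() for m in matches]
-- ===== Notes on version B (the rewrite author's own statement) =====
-- stated objective: idiomatic
-- what changed: B replaces A's manual index loop with try/except digit probing and ten lists of dead operator/log/bracket bookkeeping by a single regex scan (re.finditer(r'\d')) collecting each digit's value and position; the C-level regex engine removes the per-character exception overhead.
import Mathlib
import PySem

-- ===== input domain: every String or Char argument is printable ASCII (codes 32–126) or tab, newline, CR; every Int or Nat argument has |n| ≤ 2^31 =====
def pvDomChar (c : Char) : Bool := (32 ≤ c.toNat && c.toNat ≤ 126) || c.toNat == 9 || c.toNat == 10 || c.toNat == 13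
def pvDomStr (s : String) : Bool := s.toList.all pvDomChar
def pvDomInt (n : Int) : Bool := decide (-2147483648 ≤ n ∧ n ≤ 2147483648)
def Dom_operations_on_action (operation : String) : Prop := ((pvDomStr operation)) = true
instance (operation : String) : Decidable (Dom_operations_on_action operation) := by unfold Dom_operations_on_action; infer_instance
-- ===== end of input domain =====

-- B replaces A's manual index loop (with its dead operator/log/bracket bookkeeping) by one
-- regex-style filter over the enumerated characters; return value only, proved equal on Dom.

-- ===== PORT A =====
-- digit value of a decimal digit character (what Python's int(c) yields on '0'..'9')
def pvDigitVal (c : Char) : Int := (c.toNat : Int) - 48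

-- string of the Option Int temp_log_position as Python's str() renders it
def pvStrOpt : Option Int → String
  | some t => PySem.Int.toStr t
  | none => "None"

-- Python truthiness of temp_log_position (None and 0 are falsy)
def pvTruthy : Option Int → Bool
  | some t => t != 0
  | none => false

-- the loop of A, one step per (position, char); state = all of A's mutable variables
def opsA : List (Int × Char) → String → Option Int → List Int → List Int → List Int →
    List Int → List Int → List Int → List String → List String → List Int → List Int →
    List Int → List Int × List Int
  | [], _, _, number, np, _, _, _, _, _, _, _, _, _ => (number, np)
  | (i, c) :: rest, mem, tlp, number, np, addsub, mde, pf, lg, lnp, sq, ro, rc, ab =>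
    if c.isDigit then
      -- int() succeeds: append digit and position; flag set then cleared in finally
      opsA rest mem tlp (number ++ [pvDigitVal c]) (np ++ [i]) addsub mde pf lg lnp sq ro rc ab
    else if c = '+' ∨ c = '-' then
      opsA rest mem tlp number np (addsub ++ [i]) mde pf
        (if mem ≠ "" ∧ pvTruthy tlp then lg ++ [tlp.getD 0] else lg) lnp sq ro rc ab
    else if c = '*' ∨ c = '/' ∨ c = '^' then
      opsA rest mem tlp number np addsub (mde ++ [i]) pf
        (if mem ≠ "" ∧ pvTruthy tlp then lg ++ [tlp.getD 0] else lg) lnp sq ro rc ab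
    else if c = '%' ∨ c = '!' then
      if mem ≠ "" ∧ pvTruthy tlp then
        opsA rest "" none number np addsub mde (pf ++ [i]) (lg ++ [tlp.getD 0]) lnp sq ro rc ab
      else
        opsA rest mem tlp number np addsub mde (pf ++ [i]) lg lnp sq ro rc ab
    else if c = 'l' then
      -- NB: A writes 'memory_if_log == …' (a no-op comparison), so mem is unchanged
      opsA rest mem (some i) number np addsub mde pf lg lnp sq ro rc ab
    else if mem ≠ "" ∧ c = 'n' then
      opsA rest "" none number np addsub mde pf lg
        (lnp ++ [pvStrOpt tlp ++ PySem.Int.toStr i]) sq ro rc ab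
    else if c = 's' then
      opsA rest mem tlp number np addsub mde pf lg lnp (sq ++ ["s"]) ro rc ab
    else if c = '(' then
      opsA rest mem tlp number np addsub mde pf lg lnp sq (ro ++ [i]) rc ab
    else if c = ')' then
      opsA rest mem tlp number np addsub mde pf lg lnp sq ro (rc ++ [i]) ab
    else if c = '|' then
      opsA rest mem tlp number np addsub mde pf lg lnp sq ro rc (ab ++ [i])
    else
      opsA rest mem tlp number np addsub mde pf lg lnp sq ro rc ab

def operations_on_action (operation : String) : List Int × List Int :=
  opsA (PySem.List.enumerate operation.toList 0) "" none [] [] [] [] [] [] [] [] [] [] []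

-- ===== PORT B =====
def operations_on_action_alt (operation : String) : List Int × List Int :=
  let ms := (PySem.List.enumerate operation.toList 0).filter (fun p => p.2.isDigit)
  (ms.map (fun p => pvDigitVal p.2), ms.map (fun p => p.1))

-- ===== PRECONDITION & SPEC =====
def Spec_operations_on_action (operation : String) (out : List Int × List Int) : Prop := out = operations_on_action_alt operation
instance (operation : String) (out : List Int × List Int) : Decidable (Spec_operations_on_action operation out) := by unfold Spec_operations_on_action; infer_instance

-- ===== CLAIM (what is proved, stated in full; the proofs are below) =====
def Claim_equal_operations_on_action : Prop := ∀ (operation : String), Dom_operations_on_action operation → Spec_operations_on_action operation (operations_on_action operation)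

-- ===== LEMMAS AND PROOFS =====

-- A's loop appends exactly the digits (and their positions) of the remaining list,
-- whatever the rest of its state holds.
theorem opsA_eq_filter (l : List (Int × Char)) :
    ∀ (mem : String) (tlp : Option Int) (number np addsub mde pf lg : List Int)
      (lnp sq : List String) (ro rc ab : List Int),
    opsA l mem tlp number np addsub mde pf lg lnp sq ro rc ab =
      (number ++ (l.filter (fun p => p.2.isDigit)).map (fun p => pvDigitVal p.2),
       np ++ (l.filter (fun p => p.2.isDigit)).map (fun p => p.1)) := by
  induction l with
  | nil => intros; simp [opsA]
  | cons hd tl ih =>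
    obtain ⟨i, c⟩ := hd
    intro mem tlp number np addsub mde pf lg lnp sq ro rc ab
    by_cases hd : c.isDigit
    · simp [opsA, hd, ih]
    · simp only [opsA, hd, if_false, List.filter_cons, Bool.false_eq_true]
      split_ifs <;> simp [ih]

theorem operations_on_action_eq (operation : String) :
    operations_on_action operation = operations_on_action_alt operation := by
  unfold operations_on_action operations_on_action_alt
  rw [opsA_eq_filter]; simp


-- ===== VERDICT (by name: the statement is the Claim_ definition above) =====
theorem operations_on_action_spec : Claim_equal_operations_on_action := by
  intro operation _
  exact operations_on_action_eq operation
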